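-- pv_equiv track=rewrite | github.com/xinghun61/infra | appengine/monorail/tracker/fltconversion.py | ExtractLabelLDAPs
-- ===== SOURCE A (Python) =====
-- PM_PREFIX = 'pm-'
--
-- TL_PREFIX = 'tl-'
--
-- TEST_PREFIX = 'test-'
--
-- UX_PREFIX = 'ux-'
--
-- def ExtractLabelLDAPs(labels):
--   """Extracts LDAPs from labels 'PM-', 'TL-', 'UX-', and 'test-'"""
--
--   pm_ldap = None
--   tl_ldap = None
--   test_ldaps = []
--   ux_ldaps = []
--   for label in labels:
--     label = label.lower()
--     if label.startswith(PM_PREFIX):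
--       pm_ldap = label[len(PM_PREFIX):]
--     elif label.startswith(TL_PREFIX):
--       tl_ldap = label[len(TL_PREFIX):]
--     elif label.startswith(TEST_PREFIX):
--       ldap = label[len(TEST_PREFIX):]
--       if ldap:
--         test_ldaps.append(ldap)
--     elif label.startswith(UX_PREFIX):
--       ldap = label[len(UX_PREFIX):]
--       if ldap:
--         ux_ldaps.append(ldap)
--   return pm_ldap, tl_ldap, test_ldaps, ux_ldaps
-- ===== SOURCE B (Python) =====
-- PM_PREFIX = 'pm-'
-- TL_PREFIX = 'tl-'
-- TEST_PREFIX = 'test-'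
-- UX_PREFIX = 'ux-'
--
-- def ExtractLabelLDAPs(labels):
--   """Extracts LDAPs from labels 'PM-', 'TL-', 'UX-', and 'test-'"""
--   low = [label.lower() for label in labels]
--   pms = [l[len(PM_PREFIX):] for l in low if l.startswith(PM_PREFIX)]
--   tls = [l[len(TL_PREFIX):] for l in low if l.startswith(TL_PREFIX)]
--   test_ldaps = [l[len(TEST_PREFIX):] for l in low
--                 if l.startswith(TEST_PREFIX) and l[len(TEST_PREFIX):]]
--   ux_ldaps = [l[len(UX_PREFIX):] for l in low
--               if l.startswith(UX_PREFIX) and l[len(UX_PREFIX):]]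
--   return (pms[-1] if pms else None, tls[-1] if tls else None,
--           test_ldaps, ux_ldaps)
-- ===== Notes on version B (the rewrite author's own statement) =====
-- stated objective: simpler
-- what changed: Replaces A's single stateful elif-chain loop with four independent per-prefix passes (filtered comprehensions), taking the last matching suffix for pm/tl and the non-empty suffixes in order for test/ux; valid because the four prefixes are mutually exclusive.
import Mathlib
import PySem

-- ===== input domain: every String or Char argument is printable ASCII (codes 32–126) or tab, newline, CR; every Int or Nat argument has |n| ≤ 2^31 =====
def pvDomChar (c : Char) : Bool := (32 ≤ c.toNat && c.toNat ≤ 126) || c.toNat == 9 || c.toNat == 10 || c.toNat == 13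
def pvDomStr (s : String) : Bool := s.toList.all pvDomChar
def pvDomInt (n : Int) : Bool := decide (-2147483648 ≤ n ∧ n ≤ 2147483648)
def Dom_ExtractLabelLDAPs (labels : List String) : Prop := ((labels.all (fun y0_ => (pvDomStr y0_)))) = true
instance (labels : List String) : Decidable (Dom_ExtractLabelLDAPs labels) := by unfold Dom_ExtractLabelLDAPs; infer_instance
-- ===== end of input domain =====

-- B replaces A's single elif-chain loop by four independent prefix passes (last match for pm/tl,
-- filtered comprehensions for test/ux); objective: simpler decomposition, same cost.

-- ===== PORT A =====
-- the body of A's for-loop, as a step function over the accumulated state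
def extractStep (st : Option String × Option String × List String × List String) (label0 : String) :
    Option String × Option String × List String × List String :=
  let label := PySem.Str.lower label0
  if PySem.Str.startswith label "pm-" then
    (some (PySem.Str.slice label (some 3) none), st.2.1, st.2.2.1, st.2.2.2)
  else if PySem.Str.startswith label "tl-" then
    (st.1, some (PySem.Str.slice label (some 3) none), st.2.2.1, st.2.2.2)
  else if PySem.Str.startswith label "test-" then
    let ldap := PySem.Str.slice label (some 5) none
    if ldap ≠ "" then (st.1, st.2.1, st.2.2.1 ++ [ldap], st.2.2.2) else st
  else if PySem.Str.startswith label "ux-" then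
    let ldap := PySem.Str.slice label (some 3) none
    if ldap ≠ "" then (st.1, st.2.1, st.2.2.1, st.2.2.2 ++ [ldap]) else st
  else st

def ExtractLabelLDAPs (labels : List String) : Option String × Option String × List String × List String :=
  labels.foldl extractStep (none, none, [], [])

-- ===== PORT B =====
def ExtractLabelLDAPs_alt (labels : List String) : Option String × Option String × List String × List String :=
  let low := labels.map PySem.Str.lower
  let pms := (low.filter (fun l => PySem.Str.startswith l "pm-")).map
      (fun l => PySem.Str.slice l (some 3) none)
  let tls := (low.filter (fun l => PySem.Str.startswith l "tl-")).map
      (fun l => PySem.Str.slice l (some 3) none)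
  let testLdaps := (low.filter
      (fun l => PySem.Str.startswith l "test-" && !(PySem.Str.slice l (some 5) none == ""))).map
      (fun l => PySem.Str.slice l (some 5) none)
  let uxLdaps := (low.filter
      (fun l => PySem.Str.startswith l "ux-" && !(PySem.Str.slice l (some 3) none == ""))).map
      (fun l => PySem.Str.slice l (some 3) none)
  (pms.getLast?, tls.getLast?, testLdaps, uxLdaps)

-- ===== PRECONDITION & SPEC =====
def Spec_ExtractLabelLDAPs (labels : List String) (out : Option String × Option String × List String × List String) : Prop := out = ExtractLabelLDAPs_alt labels
instance (labels : List String) (out : Option String × Option String × List String × List String) : Decidable (Spec_ExtractLabelLDAPs labels out) := by unfold Spec_ExtractLabelLDAPs; infer_instance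

-- ===== CLAIM (what is proved, stated in full; the proofs are below) =====
def Claim_equal_ExtractLabelLDAPs : Prop := ∀ (labels : List String), Dom_ExtractLabelLDAPs labels → Spec_ExtractLabelLDAPs labels (ExtractLabelLDAPs labels)

-- ===== LEMMAS AND PROOFS =====

-- the four per-prefix passes of B, as functions of the lowered label list
def pmS (low : List String) : List String :=
  (low.filter (fun l => PySem.Str.startswith l "pm-")).map (fun l => PySem.Str.slice l (some 3) none)
def tlS (low : List String) : List String :=
  (low.filter (fun l => PySem.Str.startswith l "tl-")).map (fun l => PySem.Str.slice l (some 3) none)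
def testS (low : List String) : List String :=
  (low.filter (fun l => PySem.Str.startswith l "test-" && !(PySem.Str.slice l (some 5) none == ""))).map
    (fun l => PySem.Str.slice l (some 5) none)
def uxS (low : List String) : List String :=
  (low.filter (fun l => PySem.Str.startswith l "ux-" && !(PySem.Str.slice l (some 3) none == ""))).map
    (fun l => PySem.Str.slice l (some 3) none)

theorem alt_eq (labels : List String) :
    ExtractLabelLDAPs_alt labels =
      ((pmS (labels.map PySem.Str.lower)).getLast?, (tlS (labels.map PySem.Str.lower)).getLast?,
        testS (labels.map PySem.Str.lower), uxS (labels.map PySem.Str.lower)) := rfl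

-- two mutually non-prefix strings cannot both be prefixes of the same string
theorem sw_excl (s p q : List Char) (hq : PySem.Chars.startswith s q = true)
    (h1 : ¬ q <+: p) (h2 : ¬ p <+: q) :
    PySem.Chars.startswith s p = false := by
  by_contra h
  rw [Bool.not_eq_false, PySem.Chars.startswith_iff] at h
  rw [PySem.Chars.startswith_iff] at hq
  rcases List.prefix_or_prefix_of_prefix h hq with hc | hc
  · exact h2 hc
  · exact h1 hc

theorem fold_char (ls : List String) :
    ∀ st : Option String × Option String × List String × List String,
      ls.foldl extractStep st =
        (((pmS (ls.map PySem.Str.lower)).getLast?).or st.1,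
          ((tlS (ls.map PySem.Str.lower)).getLast?).or st.2.1,
          st.2.2.1 ++ testS (ls.map PySem.Str.lower),
          st.2.2.2 ++ uxS (ls.map PySem.Str.lower)) := by
  induction ls with
  | nil => intro st; simp [pmS, tlS, testS, uxS]
  | cons l ls ih =>
    intro st
    simp only [List.map_cons, List.foldl_cons, ih]
    by_cases hpm : PySem.Chars.startswith (PySem.Chars.lower l.toList) ['p','m','-'] = true
    · have h1 := sw_excl _ ['t','l','-'] _ hpm (by decide) (by decide)
      have h2 := sw_excl _ ['t','e','s','t','-'] _ hpm (by decide) (by decide)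
      have h3 := sw_excl _ ['u','x','-'] _ hpm (by decide) (by decide)
      simp [extractStep, pmS, tlS, testS, uxS, hpm, h1, h2, h3, List.getLast?_cons, Option.some_or]
    · by_cases htl : PySem.Chars.startswith (PySem.Chars.lower l.toList) ['t','l','-'] = true
      · have h2 := sw_excl _ ['t','e','s','t','-'] _ htl (by decide) (by decide)
        have h3 := sw_excl _ ['u','x','-'] _ htl (by decide) (by decide)
        simp [extractStep, pmS, tlS, testS, uxS, hpm, htl, h2, h3, List.getLast?_cons, Option.some_or]
      · by_cases hte : PySem.Chars.startswith (PySem.Chars.lower l.toList) ['t','e','s','t','-'] = true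
        · have h3 := sw_excl _ ['u','x','-'] _ hte (by decide) (by decide)
          by_cases he : PySem.Str.slice (PySem.Str.lower l) (some 5) none = ""
          · simp [extractStep, pmS, tlS, testS, uxS, hpm, htl, hte, h3, he]
          · simp [extractStep, pmS, tlS, testS, uxS, hpm, htl, hte, h3, he]
        · by_cases hux : PySem.Chars.startswith (PySem.Chars.lower l.toList) ['u','x','-'] = true
          · by_cases he : PySem.Str.slice (PySem.Str.lower l) (some 3) none = ""
            · simp [extractStep, pmS, tlS, testS, uxS, hpm, htl, hte, hux, he]
            · simp [extractStep, pmS, tlS, testS, uxS, hpm, htl, hte, hux, he]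
          · simp [extractStep, pmS, tlS, testS, uxS, hpm, htl, hte, hux]

-- ===== VERDICT (by name: the statement is the Claim_ definition above) =====
theorem ExtractLabelLDAPs_spec : Claim_equal_ExtractLabelLDAPs := by
  intro labels _
  show ExtractLabelLDAPs labels = ExtractLabelLDAPs_alt labels
  rw [ExtractLabelLDAPs, fold_char, alt_eq]
  simp
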